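-- pv_equiv track=rewrite | github.com/senthilts9/python-coding-challenges | Implementation/Emas Supercomputer.py | get_all_pluses
-- ===== SOURCE A (Python) =====
-- def get_max_plus_size(grid, r, c):
--     """Compute the maximum possible arm length for a plus centered at (r, c)."""
--     max_size = 0
--     while (r - max_size >= 0 and r + max_size < len(grid) and
--            c - max_size >= 0 and c + max_size < len(grid[0]) and
--            grid[r - max_size][c] == 'G' and grid[r + max_size][c] == 'G' and
--            grid[r][c - max_size] == 'G' and grid[r][c + max_size] == 'G'):
--         max_size += 1
--     return max_size - 1  # Adjust because we go one step too far in the loop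
--
-- def get_all_pluses(grid):
--     """Find all valid pluses and store them with their areas."""
--     pluses = []
--     for r in range(len(grid)):
--         for c in range(len(grid[0])):
--             if grid[r][c] == 'G':
--                 max_size = get_max_plus_size(grid, r, c)
--                 for size in range(max_size + 1):
--                     area = 4 * size + 1
--                     pluses.append((area, r, c, size))
--     return sorted(pluses, reverse=True)  # Sort by descending area
-- ===== SOURCE B (Python) =====
-- def _runs(cells):
--     """Forward scan: out[i] = length of the contiguous 'G' run ending at i (0 if cells[i] != 'G')."""
--     out = []
--     acc = 0
--     for x in cells:
--         acc = acc + 1 if x == 'G' else 0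
--         out.append(acc)
--     return out
--
-- def get_all_pluses(grid):
--     """Find all valid pluses via four directional run-length tables, sorted by descending area."""
--     R = len(grid)
--     C = len(grid[0]) if grid else 0
--     rows = [row[:C] for row in grid]
--     cols = [[rows[r][c] for r in range(R)] for c in range(C)]
--     left = [_runs(row) for row in rows]
--     right = [_runs(row[::-1])[::-1] for row in rows]
--     upT = [_runs(col) for col in cols]
--     downT = [_runs(col[::-1])[::-1] for col in cols]
--     pluses = []
--     for r in range(R):
--         for c in range(C):
--             if rows[r][c] == 'G':
--                 m = min(upT[c][r], downT[c][r], left[r][c], right[r][c]) - 1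
--                 for size in range(m + 1):
--                     pluses.append((4 * size + 1, r, c, size))
--     return sorted(pluses, reverse=True)
-- ===== Notes on version B (the rewrite author's own statement) =====
-- stated objective: alternative
-- what changed: A probes each 'G' cell with an expanding four-way ring check (a while loop of per-radius lookups per cell); B instead precomputes four directional run-length tables (up/down/left/right) with linear scans over rows and columns and reads each cell's maximal arm as min of four table lookups, keeping the same generation order and the same descending sort.
import Mathlib
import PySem

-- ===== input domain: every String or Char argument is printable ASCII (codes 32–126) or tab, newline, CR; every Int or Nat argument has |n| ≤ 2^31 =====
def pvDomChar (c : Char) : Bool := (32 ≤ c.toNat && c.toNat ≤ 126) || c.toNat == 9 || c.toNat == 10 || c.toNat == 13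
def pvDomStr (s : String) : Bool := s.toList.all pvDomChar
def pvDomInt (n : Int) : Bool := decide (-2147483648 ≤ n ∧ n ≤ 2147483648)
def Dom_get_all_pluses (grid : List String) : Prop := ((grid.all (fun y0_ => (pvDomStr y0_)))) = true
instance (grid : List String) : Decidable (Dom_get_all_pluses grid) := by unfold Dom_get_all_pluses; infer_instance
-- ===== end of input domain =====

-- B replaces A's per-cell expanding ring check by four directional run-length tables built
-- with linear scans (alternative decomposition; same generation order and the same sort).

-- ===== PORT A =====
-- grid[r][c] (both indexings; none = IndexError)
def pvLook (grid : List String) (r c : Int) : Option Char :=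
  (PySem.List.pyGet? grid r).bind (fun s => PySem.Str.pyGet? s c)

-- the while condition of get_max_plus_size; len(grid[0]) is read as Str.len (grid.headD ""),
-- equal to len(grid[0]) whenever the loop is reached (grid nonempty)
def pvGmpsCond (grid : List String) (r c ms : Int) : Bool :=
  decide (0 ≤ r - ms) && decide (r + ms < (grid.length : Int)) &&
  decide (0 ≤ c - ms) && decide (c + ms < PySem.Str.len (grid.headD "")) &&
  (pvLook grid (r - ms) c == some 'G') && (pvLook grid (r + ms) c == some 'G') &&
  (pvLook grid r (c - ms) == some 'G') && (pvLook grid r (c + ms) == some 'G')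

-- the while loop; fuel bounds the iteration count (the condition forces max_size ≤ r < len(grid),
-- so len(grid)+1 steps always reach the exit)
def pvGmpsLoop (grid : List String) (r c : Int) : Nat → Int → Int
  | 0, ms => ms
  | fuel + 1, ms => if pvGmpsCond grid r c ms then pvGmpsLoop grid r c fuel (ms + 1) else ms

def get_max_plus_size (grid : List String) (r c : Int) : Int :=
  pvGmpsLoop grid r c (grid.length + 1) 0 - 1

-- Python's `<` on 4-tuples of ints (lexicographic)
def pvTupLt (a b : Int × Int × Int × Int) : Bool :=
  decide (a.1 < b.1 ∨ (a.1 = b.1 ∧ (a.2.1 < b.2.1 ∨ (a.2.1 = b.2.1 ∧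
    (a.2.2.1 < b.2.2.1 ∨ (a.2.2.1 = b.2.2.1 ∧ a.2.2.2 < b.2.2.2))))))

-- sorted(xs, reverse=True) on 4-tuples: stable insertion, Python's reverse rule
-- (the fold-insert form of PySem.List.sorted, cf. PySem.List.sorted_rev_eq_foldl_insertBy)
def pvSortDesc (xs : List (Int × Int × Int × Int)) : List (Int × Int × Int × Int) :=
  xs.foldl (fun acc x => PySem.List.insertBy (fun a b => pvTupLt b a) x acc) []

def get_all_pluses (grid : List String) : List (Int × Int × Int × Int) :=
  pvSortDesc ((PySem.List.pyRange 0 (grid.length : Int) 1).foldl (fun acc r =>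
    (PySem.List.pyRange 0 (PySem.Str.len (grid.headD "")) 1).foldl (fun acc c =>
      if pvLook grid r c == some 'G' then
        (PySem.List.pyRange 0 (get_max_plus_size grid r c + 1) 1).foldl
          (fun acc size => acc ++ [(4 * size + 1, r, c, size)]) acc
      else acc) acc) [])

-- ===== PORT B =====
-- _runs(cells): forward scan of run lengths of 'G'
def pvRuns (cs : List Char) : List Int :=
  (cs.foldl (fun (st : Int × List Int) x =>
      let acc := if x == 'G' then st.1 + 1 else 0
      (acc, st.2 ++ [acc])) (0, [])).2

-- C = len(grid[0]) if grid else 0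
def pvCB (grid : List String) : Int :=
  if grid.length ≠ 0 then PySem.Str.len (grid.headD "") else 0

-- rows = [row[:C] for row in grid]  (strings handled on their .toList side)
def pvRowsB (grid : List String) : List (List Char) :=
  grid.map (fun s => PySem.List.slice s.toList none (some (pvCB grid)))

-- cols = [[rows[r][c] for r in range(R)] for c in range(C)]
-- (in-range Python indexing ported with pyGetD; the defaults are never reached inside Pre_)
def pvColsB (grid : List String) : List (List Char) :=
  (PySem.List.pyRange 0 (pvCB grid) 1).map (fun ci =>
    (PySem.List.pyRange 0 (grid.length : Int) 1).map (fun ri =>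
      PySem.List.pyGetD (PySem.List.pyGetD (pvRowsB grid) ri []) ci ' '))

def pvLeftB (grid : List String) : List (List Int) := (pvRowsB grid).map (fun row => pvRuns row)
-- row[::-1] is List.reverse (cf. PySem.List.slice?_none_none_neg_one)
def pvRightB (grid : List String) : List (List Int) :=
  (pvRowsB grid).map (fun row => (pvRuns row.reverse).reverse)
def pvUpB (grid : List String) : List (List Int) := (pvColsB grid).map (fun col => pvRuns col)
def pvDownB (grid : List String) : List (List Int) :=
  (pvColsB grid).map (fun col => (pvRuns col.reverse).reverse)

def get_all_pluses_alt (grid : List String) : List (Int × Int × Int × Int) :=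
  pvSortDesc ((PySem.List.pyRange 0 (grid.length : Int) 1).foldl (fun acc r =>
    (PySem.List.pyRange 0 (pvCB grid) 1).foldl (fun acc c =>
      if PySem.List.pyGetD (PySem.List.pyGetD (pvRowsB grid) r []) c ' ' == 'G' then
        (PySem.List.pyRange 0 ((min (min (min
            (PySem.List.pyGetD (PySem.List.pyGetD (pvUpB grid) c []) r 0)
            (PySem.List.pyGetD (PySem.List.pyGetD (pvDownB grid) c []) r 0))
            (PySem.List.pyGetD (PySem.List.pyGetD (pvLeftB grid) r []) c 0))
            (PySem.List.pyGetD (PySem.List.pyGetD (pvRightB grid) r []) c 0) - 1) + 1) 1).foldl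
          (fun acc size => acc ++ [(4 * size + 1, r, c, size)]) acc
      else acc) acc) [])

-- ===== PRECONDITION & SPEC =====
-- Pre_ excludes exactly the grids on which A raises IndexError: a nonempty grid with some row
-- shorter than the first row (the column loop indexes every row at positions < len(grid[0])).
def Pre_get_all_pluses (grid : List String) : Prop :=
  ∀ s ∈ grid, PySem.Str.len (grid.headD "") ≤ PySem.Str.len s
instance (grid : List String) : Decidable (Pre_get_all_pluses grid) := by
  unfold Pre_get_all_pluses; infer_instance

def pvWitness_get_all_pluses : List String := ["BGB", "GGG", "BGB"]

def Spec_get_all_pluses (grid : List String) (out : List (Int × Int × Int × Int)) : Prop := out = get_all_pluses_alt grid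
instance (grid : List String) (out : List (Int × Int × Int × Int)) : Decidable (Spec_get_all_pluses grid out) := by unfold Spec_get_all_pluses; infer_instance

-- ===== CLAIM (what is proved, stated in full; the proofs are below) =====
def Claim_equal_get_all_pluses : Prop := ∀ (grid : List String), Dom_get_all_pluses grid → Pre_get_all_pluses grid → Spec_get_all_pluses grid (get_all_pluses grid)

-- ===== LEMMAS AND PROOFS =====

-- length of the contiguous run of 'G' ending at index i (reading downward in index)
def runAt (cs : List Char) : Nat → Nat
  | 0 => if cs.getD 0 ' ' = 'G' then 1 else 0
  | i + 1 => if cs.getD (i + 1) ' ' = 'G' then runAt cs i + 1 else 0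

-- direct-recursion form of the _runs scan
def runsList : List Char → Int → List Int
  | [], _ => []
  | x :: xs, a => (if x == 'G' then a + 1 else 0) :: runsList xs (if x == 'G' then a + 1 else 0)

def chAt (grid : List String) (r c : Nat) : Char := ((grid.getD r "").toList).getD c ' '
def pvC (grid : List String) : Nat := (grid.headD "").toList.length
def rowC (grid : List String) (r : Nat) : List Char := ((grid.getD r "").toList).take (pvC grid)
def colC (grid : List String) (c : Nat) : List Char :=
  grid.map (fun s => (s.toList.take (pvC grid)).getD c ' ')

-- the maximal-arm value both programs compute
def armN (grid : List String) (r c : Nat) : Nat :=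
  min (min (runAt (colC grid c) r) (runAt (colC grid c).reverse (grid.length - 1 - r)))
      (min (runAt (rowC grid r) c) (runAt (rowC grid r).reverse (pvC grid - 1 - c)))

theorem runAt_le (cs : List Char) (i : Nat) : runAt cs i ≤ i + 1 := by
  induction i with
  | zero => simp only [runAt]; split <;> omega
  | succ i ih => simp only [runAt]; split <;> omega

theorem runAt_get (cs : List Char) (i : Nat) : ∀ k, k < runAt cs i →
    k ≤ i ∧ cs.getD (i - k) ' ' = 'G' := by
  induction i with
  | zero =>
      intro k h; simp only [runAt] at h; split at h
      · interval_cases k; simpa using ‹_›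
      · omega
  | succ i ih =>
      intro k h; simp only [runAt] at h; split at h
      · match k with
        | 0 => exact ⟨Nat.zero_le _, by simpa using ‹_›⟩
        | k' + 1 =>
          obtain ⟨h1, h2⟩ := ih k' (by omega)
          exact ⟨by omega, by rwa [Nat.succ_sub_succ]⟩
      · omega

theorem runAt_stop (cs : List Char) (i : Nat) (h : runAt cs i ≤ i) :
    cs.getD (i - runAt cs i) ' ' ≠ 'G' := by
  induction i with
  | zero =>
      by_cases hg : cs.getD 0 ' ' = 'G'
      · simp only [runAt, if_pos hg] at h; omega
      · simp only [runAt, if_neg hg, Nat.sub_zero]; exact hg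
  | succ i ih =>
      by_cases hg : cs.getD (i + 1) ' ' = 'G'
      · have he : runAt cs (i + 1) = runAt cs i + 1 := by simp only [runAt, if_pos hg]
        rw [he] at h ⊢
        have := ih (by omega)
        rwa [Nat.succ_sub_succ]
      · simp only [runAt, if_neg hg, Nat.sub_zero]; exact hg

theorem runAt_append (pre ys : List Char) (j : Nat) (hj : j < pre.length) :
    runAt (pre ++ ys) j = runAt pre j := by
  induction j with
  | zero => simp only [runAt]; rw [List.getD_append _ _ _ _ hj]
  | succ j ih =>
      simp only [runAt, ih (by omega)]
      rw [List.getD_append _ _ _ _ hj]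

theorem runAt_snoc (pre : List Char) (x : Char) :
    runAt (pre ++ [x]) pre.length =
      if x = 'G' then runAt pre (pre.length - 1) + 1 else 0 := by
  match hp : pre with
  | [] => simp [runAt]
  | y :: pre' =>
      have hl : (y :: pre').length = pre'.length + 1 := by simp
      rw [hl]
      have hx : ((y :: pre') ++ [x]).getD (pre'.length + 1) ' ' = x := by
        rw [List.getD, show pre'.length + 1 = (y :: pre').length from by simp,
          List.getElem?_concat_length]
        rfl
      simp only [runAt, hx]
      rw [runAt_append _ _ _ (by simp)]
      simp

theorem pvRuns_foldl (cs : List Char) : ∀ (a : Int) (out : List Int),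
    (cs.foldl (fun (st : Int × List Int) x =>
      let acc := if x == 'G' then st.1 + 1 else 0
      (acc, st.2 ++ [acc])) (a, out)).2 = out ++ runsList cs a := by
  induction cs with
  | nil => intro a out; simp [runsList]
  | cons x xs ih => intro a out; simp only [List.foldl_cons, runsList]; rw [ih]; simp

theorem pvRuns_eq (cs : List Char) : pvRuns cs = runsList cs 0 := by
  unfold pvRuns; rw [pvRuns_foldl]; simp

theorem length_runsList (cs : List Char) : ∀ a, (runsList cs a).length = cs.length := by
  induction cs with
  | nil => simp [runsList]
  | cons x xs ih => intro a; simp [runsList, ih]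

theorem runsList_getD (xs : List Char) : ∀ (pre : List Char) (i : Nat), i < xs.length →
    (runsList xs ((runAt pre (pre.length - 1) : Nat) : Int)).getD i 0
      = ((runAt (pre ++ xs) (pre.length + i) : Nat) : Int) := by
  induction xs with
  | nil => intro pre i h; simp at h
  | cons x xs ih =>
      intro pre i h
      have ha : ((if x == 'G' then ((runAt pre (pre.length - 1) : Nat) : Int) + 1 else 0))
          = ((runAt (pre ++ [x]) ((pre ++ [x]).length - 1) : Nat) : Int) := by
        rw [show (pre ++ [x]).length - 1 = pre.length by simp]
        rw [runAt_snoc pre x]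
        by_cases hx : x = 'G' <;> simp [hx]
      match i with
      | 0 =>
        show (if x == 'G' then ((runAt pre (pre.length - 1) : Nat) : Int) + 1 else 0) = _
        rw [ha]
        congr 1
        rw [show (pre ++ [x]).length - 1 = pre.length from by simp, Nat.add_zero,
          show pre ++ x :: xs = (pre ++ [x]) ++ xs from by simp,
          runAt_append (pre ++ [x]) xs pre.length (by simp)]
      | i + 1 =>
        show (runsList xs (if x == 'G' then ((runAt pre (pre.length - 1) : Nat) : Int) + 1 else 0)).getD i 0 = _
        rw [ha, ih (pre ++ [x]) i (by simpa using h)]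
        congr 1
        rw [show (pre ++ [x]) ++ xs = pre ++ x :: xs from by simp]
        congr 1
        simp
        omega

theorem pvRuns_getD (cs : List Char) (i : Nat) (hi : i < cs.length) :
    (pvRuns cs).getD i 0 = ((runAt cs i : Nat) : Int) := by
  rw [pvRuns_eq]
  have := runsList_getD cs [] i (by simpa using hi)
  simpa [runAt] using this

theorem length_pvRuns (cs : List Char) : (pvRuns cs).length = cs.length := by
  rw [pvRuns_eq]; exact length_runsList cs 0


theorem take_getD {α : Type} (l : List α) (C j : Nat) (hj : j < C) (d : α) :
    (l.take C).getD j d = l.getD j d := by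
  simp [List.getD, hj]

theorem pre_len (grid : List String) (hpre : Pre_get_all_pluses grid) (r : Nat)
    (hr : r < grid.length) : pvC grid ≤ (grid.getD r "").toList.length := by
  have hm : grid.getD r "" ∈ grid := by
    rw [List.getD_eq_getElem _ _ hr]; exact List.getElem_mem hr
  have := hpre _ hm
  simp only [PySem.Str.len_eq, pvC] at *
  exact_mod_cast this

theorem pvLook_eq (grid : List String) (r c : Nat) (hr : r < grid.length)
    (hc : c < (grid.getD r "").toList.length) :
    pvLook grid (r : Int) (c : Int) = some (chAt grid r c) := by
  rw [List.getD_eq_getElem _ _ hr] at hc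
  unfold pvLook chAt
  rw [PySem.List.pyGet?_natCast, List.getElem?_eq_getElem hr, Option.bind_some,
    PySem.Str.pyGet?_natCast, List.getD_eq_getElem _ _ hr,
    List.getD_eq_getElem _ _ hc, List.getElem?_eq_getElem hc]

theorem rowC_getD (grid : List String) (r c : Nat) (hc : c < pvC grid) :
    (rowC grid r).getD c ' ' = chAt grid r c := take_getD _ _ _ hc _

theorem length_rowC (grid : List String) (hpre : Pre_get_all_pluses grid) (r : Nat)
    (hr : r < grid.length) : (rowC grid r).length = pvC grid := by
  have := pre_len grid hpre r hr
  simp only [rowC, List.length_take]; omega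

theorem length_colC (grid : List String) (c : Nat) : (colC grid c).length = grid.length := by
  simp [colC]

theorem colC_getD (grid : List String) (r c : Nat) (hr : r < grid.length) (hc : c < pvC grid) :
    (colC grid c).getD r ' ' = chAt grid r c := by
  unfold colC chAt
  rw [List.getD_eq_getElem _ _ (by simpa using hr), List.getElem_map,
    take_getD _ _ _ hc, List.getD_eq_getElem grid _ hr]

theorem strlen_headD (grid : List String) :
    PySem.Str.len (grid.headD "") = ((pvC grid : Nat) : Int) := by
  simp [PySem.Str.len_eq, pvC]

theorem gmps_cond_true (grid : List String) (hpre : Pre_get_all_pluses grid) (r c ms : Nat)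
    (hr : r < grid.length) (hc : c < pvC grid) (hms : ms < armN grid r c) :
    pvGmpsCond grid (r : Int) (c : Int) (ms : Int) = true := by
  have hlen := pre_len grid hpre
  have hCcol : (colC grid c).length = grid.length := length_colC grid c
  have hCrow : (rowC grid r).length = pvC grid := length_rowC grid hpre r hr
  obtain ⟨hau, had, hal, har⟩ : ms < runAt (colC grid c) r ∧
      ms < runAt (colC grid c).reverse (grid.length - 1 - r) ∧
      ms < runAt (rowC grid r) c ∧
      ms < runAt (rowC grid r).reverse (pvC grid - 1 - c) := by
    unfold armN at hms; omega
  obtain ⟨hu1, hu2⟩ := runAt_get _ _ _ hau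
  obtain ⟨hd1, hd2⟩ := runAt_get _ _ _ had
  obtain ⟨hl1, hl2⟩ := runAt_get _ _ _ hal
  obtain ⟨hr1, hr2⟩ := runAt_get _ _ _ har
  have hd2' : (colC grid c).getD (r + ms) ' ' = 'G' := by
    have heq := congrFun (List.getD_reverse (l := colC grid c)
      (grid.length - 1 - r - ms) (by omega)) ' '
    rw [heq] at hd2
    rwa [show (colC grid c).length - 1 - (grid.length - 1 - r - ms) = r + ms from by
      rw [hCcol]; omega] at hd2
  have hr2' : (rowC grid r).getD (c + ms) ' ' = 'G' := by
    have heq := congrFun (List.getD_reverse (l := rowC grid r)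
      (pvC grid - 1 - c - ms) (by omega)) ' '
    rw [heq] at hr2
    rwa [show (rowC grid r).length - 1 - (pvC grid - 1 - c - ms) = c + ms from by
      rw [hCrow]; omega] at hr2
  rw [colC_getD grid (r - ms) c (by omega) hc] at hu2
  rw [colC_getD grid (r + ms) c (by omega) hc] at hd2'
  rw [rowC_getD grid r (c - ms) (by omega)] at hl2
  rw [rowC_getD grid r (c + ms) (by omega)] at hr2'
  unfold pvGmpsCond
  rw [strlen_headD grid]
  rw [show (r : Int) - (ms : Int) = ((r - ms : Nat) : Int) from by omega,
      show (r : Int) + (ms : Int) = ((r + ms : Nat) : Int) from by omega,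
      show (c : Int) - (ms : Int) = ((c - ms : Nat) : Int) from by omega,
      show (c : Int) + (ms : Int) = ((c + ms : Nat) : Int) from by omega]
  rw [pvLook_eq grid (r - ms) c (by omega) (by have := hlen (r - ms) (by omega); omega),
      pvLook_eq grid (r + ms) c (by omega) (by have := hlen (r + ms) (by omega); omega),
      pvLook_eq grid r (c - ms) hr (by have := hlen r hr; omega),
      pvLook_eq grid r (c + ms) hr (by have := hlen r hr; omega)]
  simp only [Bool.and_eq_true, decide_eq_true_eq, beq_iff_eq, Option.some.injEq]
  and_intros <;> first | assumption | omega

theorem gmps_cond_false (grid : List String) (hpre : Pre_get_all_pluses grid) (r c : Nat)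
    (hr : r < grid.length) (hc : c < pvC grid) :
    pvGmpsCond grid (r : Int) (c : Int) ((armN grid r c : Nat) : Int) = false := by
  have hlen := pre_len grid hpre
  have hCcol : (colC grid c).length = grid.length := length_colC grid c
  have hCrow : (rowC grid r).length = pvC grid := length_rowC grid hpre r hr
  by_contra hcontra
  rw [Bool.not_eq_false] at hcontra
  unfold pvGmpsCond at hcontra
  rw [strlen_headD grid] at hcontra
  simp only [Bool.and_eq_true, decide_eq_true_eq] at hcontra
  obtain ⟨⟨⟨⟨⟨⟨⟨h1, h2⟩, h3⟩, h4⟩, h5⟩, h6⟩, h7⟩, h8⟩ := hcontra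
  have hn1 : armN grid r c ≤ r := by omega
  have hn2 : r + armN grid r c < grid.length := by omega
  have hn3 : armN grid r c ≤ c := by omega
  have hn4 : c + armN grid r c < pvC grid := by omega
  rw [show (r : Int) - ((armN grid r c : Nat) : Int) = ((r - armN grid r c : Nat) : Int) from by omega,
      pvLook_eq grid _ c (by omega) (by have := hlen (r - armN grid r c) (by omega); omega)] at h5
  rw [show (r : Int) + ((armN grid r c : Nat) : Int) = ((r + armN grid r c : Nat) : Int) from by omega,
      pvLook_eq grid _ c (by omega) (by have := hlen (r + armN grid r c) (by omega); omega)] at h6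
  rw [show (c : Int) - ((armN grid r c : Nat) : Int) = ((c - armN grid r c : Nat) : Int) from by omega,
      pvLook_eq grid r _ hr (by have := hlen r hr; omega)] at h7
  rw [show (c : Int) + ((armN grid r c : Nat) : Int) = ((c + armN grid r c : Nat) : Int) from by omega,
      pvLook_eq grid r _ hr (by have := hlen r hr; omega)] at h8
  simp only [beq_iff_eq, Option.some.injEq] at h5 h6 h7 h8
  rcases (show armN grid r c = runAt (colC grid c) r ∨
      armN grid r c = runAt (colC grid c).reverse (grid.length - 1 - r) ∨
      armN grid r c = runAt (rowC grid r) c ∨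
      armN grid r c = runAt (rowC grid r).reverse (pvC grid - 1 - c) from by
    unfold armN; omega) with hcase | hcase | hcase | hcase
  · have hstop := runAt_stop (colC grid c) r (by omega)
    rw [← hcase, colC_getD grid (r - armN grid r c) c (by omega) hc] at hstop
    exact hstop h5
  · have hstop := runAt_stop (colC grid c).reverse (grid.length - 1 - r) (by omega)
    rw [← hcase] at hstop
    have heq := congrFun (List.getD_reverse (l := colC grid c)
      (grid.length - 1 - r - armN grid r c) (by omega)) ' '
    rw [heq, show (colC grid c).length - 1 - (grid.length - 1 - r - armN grid r c)
        = r + armN grid r c from by rw [hCcol]; omega,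
      colC_getD grid (r + armN grid r c) c (by omega) hc] at hstop
    exact hstop h6
  · have hstop := runAt_stop (rowC grid r) c (by omega)
    rw [← hcase, rowC_getD grid r (c - armN grid r c) (by omega)] at hstop
    exact hstop h7
  · have hstop := runAt_stop (rowC grid r).reverse (pvC grid - 1 - c) (by omega)
    rw [← hcase] at hstop
    have heq := congrFun (List.getD_reverse (l := rowC grid r)
      (pvC grid - 1 - c - armN grid r c) (by omega)) ' '
    rw [heq, show (rowC grid r).length - 1 - (pvC grid - 1 - c - armN grid r c)
        = c + armN grid r c from by rw [hCrow]; omega,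
      rowC_getD grid r (c + armN grid r c) (by omega)] at hstop
    exact hstop h8

theorem loop_eq (grid : List String) (hpre : Pre_get_all_pluses grid) (r c : Nat)
    (hr : r < grid.length) (hc : c < pvC grid) :
    ∀ (fuel ms : Nat), ms ≤ armN grid r c → armN grid r c ≤ ms + fuel →
    pvGmpsLoop grid (r : Int) (c : Int) fuel (ms : Int) = ((armN grid r c : Nat) : Int) := by
  intro fuel
  induction fuel with
  | zero =>
      intro ms h1 h2
      have h3 : ms = armN grid r c := by omega
      simp [pvGmpsLoop, h3]
  | succ fuel ih =>
      intro ms h1 h2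
      by_cases hlt : ms < armN grid r c
      · rw [pvGmpsLoop, gmps_cond_true grid hpre r c ms hr hc hlt]
        rw [if_pos rfl]
        rw [show ((ms : Int) + 1) = ((ms + 1 : Nat) : Int) from by push_cast; ring]
        exact ih (ms + 1) (by omega) (by omega)
      · have h3 : ms = armN grid r c := by omega
        subst h3
        rw [pvGmpsLoop, gmps_cond_false grid hpre r c hr hc]
        simp

theorem gmps_eq (grid : List String) (hpre : Pre_get_all_pluses grid) (r c : Nat)
    (hr : r < grid.length) (hc : c < pvC grid) :
    get_max_plus_size grid (r : Int) (c : Int) = ((armN grid r c : Nat) : Int) - 1 := by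
  unfold get_max_plus_size
  have h1 := runAt_le (colC grid c) r
  have hle : armN grid r c ≤ runAt (colC grid c) r := by unfold armN; omega
  have h2 := loop_eq grid hpre r c hr hc (grid.length + 1) 0 (by omega) (by omega)
  simp only [Nat.cast_zero] at h2
  rw [h2]

-- B-side bridges
theorem pvCB_eq (grid : List String) (hne : grid.length ≠ 0) :
    pvCB grid = ((pvC grid : Nat) : Int) := by
  simp [pvCB, hne, PySem.Str.len_eq, pvC]

theorem rowsB_eq (grid : List String) (hne : grid.length ≠ 0) :
    pvRowsB grid = grid.map (fun s => s.toList.take (pvC grid)) := by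
  unfold pvRowsB
  rw [pvCB_eq grid hne]
  apply List.map_congr_left
  intro s _
  rw [PySem.List.slice_to _ (by positivity), Int.toNat_natCast]

theorem rowsB_getD (grid : List String) (r : Nat) (hne : grid.length ≠ 0) :
    (pvRowsB grid).getD r [] = rowC grid r := by
  rw [rowsB_eq grid hne,
    show ([] : List Char) = (("" : String).toList.take (pvC grid)) from by simp, List.getD_map]
  rfl

theorem colsB_getD (grid : List String) (c : Nat) (hne : grid.length ≠ 0) (hc : c < pvC grid) :
    (pvColsB grid).getD c [] = colC grid c := by
  unfold pvColsB
  rw [pvCB_eq grid hne]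
  simp only [PySem.List.pyRange_one, List.map_map, Int.sub_zero, Int.toNat_natCast]
  rw [PySem.List.getD_map_range _ _ _ _ hc]
  simp only [Function.comp_apply, zero_add]
  apply List.ext_getElem
  · simp [length_colC]
  · intro k hk1 hk2
    have hkR : k < grid.length := by simpa using hk1
    simp only [List.getElem_map, List.getElem_range, Function.comp_apply,
      PySem.List.pyGetD_natCast]
    rw [rowsB_getD grid k hne, rowC_getD grid k c hc,
      ← colC_getD grid k c hkR hc, List.getD_eq_getElem _ _ (by rwa [length_colC])]

theorem up_val (grid : List String) (r c : Nat)
    (hr : r < grid.length) (hc : c < pvC grid) :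
    PySem.List.pyGetD (PySem.List.pyGetD (pvUpB grid) (c : Int) []) (r : Int) 0
      = ((runAt (colC grid c) r : Nat) : Int) := by
  have hne : grid.length ≠ 0 := by omega
  unfold pvUpB
  simp only [PySem.List.pyGetD_natCast]
  rw [show ([] : List Int) = pvRuns [] from rfl, List.getD_map, colsB_getD grid c hne hc]
  exact pvRuns_getD _ r (by rw [length_colC]; exact hr)

theorem down_val (grid : List String) (r c : Nat)
    (hr : r < grid.length) (hc : c < pvC grid) :
    PySem.List.pyGetD (PySem.List.pyGetD (pvDownB grid) (c : Int) []) (r : Int) 0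
      = ((runAt (colC grid c).reverse (grid.length - 1 - r) : Nat) : Int) := by
  have hne : grid.length ≠ 0 := by omega
  unfold pvDownB
  simp only [PySem.List.pyGetD_natCast]
  rw [show ([] : List Int) = (pvRuns ([] : List Char).reverse).reverse from rfl, List.getD_map,
    colsB_getD grid c hne hc]
  have hlen : (pvRuns (colC grid c).reverse).length = grid.length := by
    rw [length_pvRuns, List.length_reverse, length_colC]
  rw [congrFun (List.getD_reverse (l := pvRuns (colC grid c).reverse) r (by omega)) 0]
  rw [hlen]
  exact pvRuns_getD _ _ (by rw [List.length_reverse, length_colC]; omega)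

theorem left_val (grid : List String) (hpre : Pre_get_all_pluses grid) (r c : Nat)
    (hr : r < grid.length) (hc : c < pvC grid) :
    PySem.List.pyGetD (PySem.List.pyGetD (pvLeftB grid) (r : Int) []) (c : Int) 0
      = ((runAt (rowC grid r) c : Nat) : Int) := by
  have hne : grid.length ≠ 0 := by omega
  unfold pvLeftB
  simp only [PySem.List.pyGetD_natCast]
  rw [show ([] : List Int) = pvRuns [] from rfl, List.getD_map, rowsB_getD grid r hne]
  exact pvRuns_getD _ c (by rw [length_rowC grid hpre r hr]; exact hc)

theorem right_val (grid : List String) (hpre : Pre_get_all_pluses grid) (r c : Nat)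
    (hr : r < grid.length) (hc : c < pvC grid) :
    PySem.List.pyGetD (PySem.List.pyGetD (pvRightB grid) (r : Int) []) (c : Int) 0
      = ((runAt (rowC grid r).reverse (pvC grid - 1 - c) : Nat) : Int) := by
  have hne : grid.length ≠ 0 := by omega
  unfold pvRightB
  simp only [PySem.List.pyGetD_natCast]
  rw [show ([] : List Int) = (pvRuns ([] : List Char).reverse).reverse from rfl, List.getD_map,
    rowsB_getD grid r hne]
  have hlen : (pvRuns (rowC grid r).reverse).length = pvC grid := by
    rw [length_pvRuns, List.length_reverse, length_rowC grid hpre r hr]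
  rw [congrFun (List.getD_reverse (l := pvRuns (rowC grid r).reverse) c (by omega)) 0]
  rw [hlen]
  exact pvRuns_getD _ _ (by rw [List.length_reverse, length_rowC grid hpre r hr]; omega)

theorem b_entry (grid : List String) (hpre : Pre_get_all_pluses grid) (r c : Nat)
    (hr : r < grid.length) (hc : c < pvC grid) :
    min (min (min
      (PySem.List.pyGetD (PySem.List.pyGetD (pvUpB grid) (c : Int) []) (r : Int) 0)
      (PySem.List.pyGetD (PySem.List.pyGetD (pvDownB grid) (c : Int) []) (r : Int) 0))
      (PySem.List.pyGetD (PySem.List.pyGetD (pvLeftB grid) (r : Int) []) (c : Int) 0))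
      (PySem.List.pyGetD (PySem.List.pyGetD (pvRightB grid) (r : Int) []) (c : Int) 0)
      = ((armN grid r c : Nat) : Int) := by
  rw [up_val grid r c hr hc, down_val grid r c hr hc,
    left_val grid hpre r c hr hc, right_val grid hpre r c hr hc]
  unfold armN
  omega

-- ===== VERDICT (by name: the statement is the Claim_ definition above) =====
theorem get_all_pluses_spec : Claim_equal_get_all_pluses := by
  intro grid _ hpre
  show get_all_pluses grid = get_all_pluses_alt grid
  unfold get_all_pluses get_all_pluses_alt
  congr 1
  apply PySem.List.foldl_congr_mem
  intro acc r hrmem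
  obtain ⟨hr0, hrlt⟩ := PySem.List.mem_pyRange_one.mp hrmem
  have hne : grid.length ≠ 0 := by omega
  obtain ⟨rn, rfl⟩ : ∃ rn : Nat, r = (rn : Int) := ⟨r.toNat, by omega⟩
  have hrn : rn < grid.length := by exact_mod_cast hrlt
  rw [strlen_headD grid, pvCB_eq grid hne]
  apply PySem.List.foldl_congr_mem
  intro acc2 cI hcmem
  obtain ⟨hc0, hclt⟩ := PySem.List.mem_pyRange_one.mp hcmem
  obtain ⟨cn, rfl⟩ : ∃ cn : Nat, cI = (cn : Int) := ⟨cI.toNat, by omega⟩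
  have hcn : cn < pvC grid := by exact_mod_cast hclt
  have hcond_a : (pvLook grid (rn : Int) (cn : Int) == some 'G') = (chAt grid rn cn == 'G') := by
    rw [pvLook_eq grid rn cn hrn (by have := pre_len grid hpre rn hrn; omega)]
    by_cases h : chAt grid rn cn = 'G' <;> simp [h]
  have hcond_b : (PySem.List.pyGetD (PySem.List.pyGetD (pvRowsB grid) (rn : Int) []) (cn : Int) ' ' == 'G')
      = (chAt grid rn cn == 'G') := by
    simp only [PySem.List.pyGetD_natCast]
    rw [rowsB_getD grid rn hne, rowC_getD grid rn cn hcn]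
  rw [hcond_a, hcond_b]
  by_cases hG : chAt grid rn cn = 'G'
  · simp only [hG, beq_self_eq_true, if_true]
    rw [gmps_eq grid hpre rn cn hrn hcn, b_entry grid hpre rn cn hrn hcn]
  · have hf : (chAt grid rn cn == 'G') = false := by simp [hG]
    rw [hf]
    simp
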